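-- pv_equiv track=rewrite | github.com/Ollson2921/cperms_ins_enc | insertion_encoding/check_regular/check_regular_hori.py | is_constant
-- ===== SOURCE A (Python) =====
-- def is_constant(cperm: list[int], vals_seen=None) -> bool:
--     """Returns True if the sequence is constant.
--     Also checks that no vals in vals_seen occur in the sequence."""
--     if vals_seen is None:
--         vals_seen = set()
--     if len(cperm) == 0:
--         return True
--     if cperm[0] in vals_seen:
--         return False
--     if len(cperm) == 1:
--         return True
--     left = cperm[0]
--     for idx in range(1, len(cperm)):
--         if left != cperm[idx]:
--             return False
--         if cperm[idx] in vals_seen: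
--             return False
--     return True
-- ===== SOURCE B (Python) =====
-- def is_constant(cperm: list[int], vals_seen=None) -> bool:
--     """Returns True if the sequence is constant.
--     Also checks that no vals in vals_seen occur in the sequence."""
--     if vals_seen is None:
--         vals_seen = set()
--     s = set(cperm)
--     return len(s) <= 1 and s.isdisjoint(vals_seen)
-- ===== Notes on version B (the rewrite author's own statement) =====
-- stated objective: simpler
-- what changed: Replaces A's early-exit index loop (per-element equality and membership tests with three pre-checks) by building the distinct-value set once and returning len(set) <= 1 together with a single disjointness test against vals_seen.
import Mathlib
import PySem

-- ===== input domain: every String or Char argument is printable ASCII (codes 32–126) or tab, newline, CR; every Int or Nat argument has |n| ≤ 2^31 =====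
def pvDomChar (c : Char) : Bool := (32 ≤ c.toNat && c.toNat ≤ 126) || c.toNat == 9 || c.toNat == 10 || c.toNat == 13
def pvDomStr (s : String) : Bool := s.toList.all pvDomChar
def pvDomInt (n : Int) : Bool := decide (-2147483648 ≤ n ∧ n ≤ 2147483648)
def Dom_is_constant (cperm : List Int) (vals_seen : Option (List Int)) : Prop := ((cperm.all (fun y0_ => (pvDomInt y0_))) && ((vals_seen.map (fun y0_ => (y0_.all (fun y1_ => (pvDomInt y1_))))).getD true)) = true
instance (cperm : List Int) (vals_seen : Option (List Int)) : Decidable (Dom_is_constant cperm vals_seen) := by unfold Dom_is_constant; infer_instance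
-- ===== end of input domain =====

-- B replaces A's early-exit index loop by one distinct-value set: constancy is len(set) <= 1
-- and the forbidden-value scan is a single disjointness test (objective: simpler).


-- ===== PORT A =====
-- A's 'for idx in range(1, len(cperm))' with its two early 'return False's:
-- recursion over the index list; cperm[idx] is always in range, so pyGetD is exact here.
def isConstLoopA (vals : List Int) (left : Int) (cperm : List Int) : List Int → Bool
  | [] => true
  | idx :: rest =>
    if left ≠ PySem.List.pyGetD cperm idx 0 then false
    else if vals.contains (PySem.List.pyGetD cperm idx 0) then false
    else isConstLoopA vals left cperm rest

def is_constant (cperm : List Int) (vals_seen : Option (List Int)) : Bool :=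
  let vals := vals_seen.getD []   -- 'if vals_seen is None: vals_seen = set()'
  if cperm.length = 0 then true
  else if vals.contains (PySem.List.pyGetD cperm 0 0) then false
  else if cperm.length = 1 then true
  else
    let left := PySem.List.pyGetD cperm 0 0
    isConstLoopA vals left cperm (PySem.List.pyRange 1 (cperm.length : Int) 1)

-- ===== PORT B =====
def is_constant_alt (cperm : List Int) (vals_seen : Option (List Int)) : Bool :=
  let vals := vals_seen.getD []
  let s : PySem.Set Int := PySem.Set.ofList cperm
  decide (s.length ≤ 1) && PySem.Set.isdisjoint s vals

-- ===== PRECONDITION & SPEC =====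
def Spec_is_constant (cperm : List Int) (vals_seen : Option (List Int)) (out : Bool) : Prop := out = is_constant_alt cperm vals_seen
instance (cperm : List Int) (vals_seen : Option (List Int)) (out : Bool) : Decidable (Spec_is_constant cperm vals_seen out) := by unfold Spec_is_constant; infer_instance

-- ===== CLAIM (what is proved, stated in full; the proofs are below) =====
def Claim_equal_is_constant : Prop := ∀ (cperm : List Int) (vals_seen : Option (List Int)), Dom_is_constant cperm vals_seen → Spec_is_constant cperm vals_seen (is_constant cperm vals_seen)

-- ===== LEMMAS AND PROOFS =====

-- the canonical value both programs compute
def goodIC (vals : List Int) : List Int → Bool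
  | [] => true
  | h :: t => !vals.contains h && t.all (fun x => (h == x) && !vals.contains x)

theorem loopA_eq (vals : List Int) (left : Int) (cperm : List Int) (k : Nat) :
    isConstLoopA vals left cperm (PySem.List.pyRange (k : Int) (cperm.length : Int) 1)
      = (cperm.drop k).all (fun x => (left == x) && !vals.contains x) := by
  by_cases hk : cperm.length ≤ k
  · rw [PySem.List.pyRange_one_eq_nil (by exact_mod_cast hk)]
    rw [List.drop_eq_nil_of_le hk]
    simp [isConstLoopA]
  · push Not at hk
    rw [PySem.List.pyRange_one_cons (by exact_mod_cast hk)]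
    have hget : PySem.List.pyGetD cperm (k : Int) 0 = cperm[k] := by
      rw [PySem.List.pyGetD_natCast]; exact List.getD_eq_getElem cperm 0 hk
    have hdrop : cperm.drop k = cperm[k] :: cperm.drop (k + 1) :=
      (List.drop_eq_getElem_cons hk)
    have hrec : ((k : Int) + 1) = ((k + 1 : Nat) : Int) := by push_cast; ring
    rw [hdrop]
    simp only [isConstLoopA, hget, hrec, loopA_eq vals left cperm (k + 1), List.all_cons]
    by_cases h1 : left = cperm[k]
    · by_cases h2 : cperm[k] ∈ vals <;> simp [h1, h2]
    · simp [h1]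
termination_by cperm.length - k

theorem A_eq_good (cperm : List Int) (vals : List Int) :
    is_constant cperm (some vals) = goodIC vals cperm := by
  cases cperm with
  | nil => simp [is_constant, goodIC]
  | cons h t =>
    simp only [is_constant, goodIC, Option.getD_some]
    have hget : PySem.List.pyGetD (h :: t) 0 0 = h := PySem.List.pyGetD_zero_cons h t 0
    by_cases hc : h ∈ vals
    · simp [hget, hc]
    · cases t with
      | nil => simp [hget, hc]
      | cons a u =>
        have hloop := loopA_eq vals h (h :: a :: u) 1
        simp only [Nat.cast_one, List.length_cons, List.drop_succ_cons, List.drop_zero] at hloop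
        push_cast at hloop
        simp [hget, hc, hloop]

theorem foldl_add_absorb (t : List Int) (s : PySem.Set Int) (h : ∀ x ∈ t, x ∈ s) :
    t.foldl PySem.Set.add s = s := by
  induction t with
  | nil => rfl
  | cons a u ih =>
    have hm : a ∈ s := h a (by simp)
    have ha : PySem.Set.add s a = s := by simp [PySem.Set.add, hm]
    simp only [List.foldl_cons, ha]
    exact ih (fun x hx => h x (by simp [hx]))

theorem ofList_const (h : Int) (t : List Int) (hall : ∀ x ∈ t, x = h) :
    PySem.Set.ofList (h :: t) = [h] := by
  rw [PySem.Set.ofList_eq_foldl]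
  simp only [List.foldl_cons]
  have h0 : PySem.Set.add ([] : PySem.Set Int) h = [h] := by simp [PySem.Set.add]
  rw [h0]
  exact foldl_add_absorb t [h] (fun x hx => by simp [hall x hx])

theorem B_eq_good (cperm : List Int) (vals : List Int) :
    is_constant_alt cperm (some vals) = goodIC vals cperm := by
  cases cperm with
  | nil => rfl
  | cons h t =>
    simp only [is_constant_alt, goodIC, Option.getD_some]
    by_cases hconst : ∀ x ∈ t, x = h
    · rw [ofList_const h t hconst]
      by_cases hc : h ∈ vals
      · have h1 : PySem.Set.isdisjoint ([h] : PySem.Set Int) vals = false := by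
          rw [Bool.eq_false_iff]
          intro habs
          exact ((PySem.Set.isdisjoint_iff _ _).1 habs h (by simp)) hc
        simp [h1, hc]
      · have h1 : PySem.Set.isdisjoint ([h] : PySem.Set Int) vals = true := by
          rw [PySem.Set.isdisjoint_iff]
          intro x hx
          simp at hx
          subst hx
          exact hc
        simp only [h1]
        simp only [List.length_cons, List.length_nil]
        simp [hc]
        intro x hx
        exact ⟨(hconst x hx).symm, by rw [hconst x hx]; exact hc⟩
    · push Not at hconst
      obtain ⟨x, hxt, hxh⟩ := hconst
      have hhm : h ∈ PySem.Set.ofList (h :: t) := (PySem.Set.mem_ofList _ _).2 (by simp)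
      have hxm : x ∈ PySem.Set.ofList (h :: t) := (PySem.Set.mem_ofList _ _).2 (by simp [hxt])
      have hlen : ¬ ((PySem.Set.ofList (h :: t)).length ≤ 1) := by
        intro hle
        match hs : PySem.Set.ofList (h :: t), hle with
        | [], _ => rw [hs] at hhm; simp at hhm
        | [a], _ =>
          rw [hs] at hhm hxm; simp at hhm hxm
          exact hxh (hxm.trans hhm.symm)
      have R : (t.all fun y => (h == y) && !vals.contains y) = false :=
        List.all_eq_false.mpr ⟨x, hxt, by simp [Ne.symm hxh]⟩
      rw [R]
      simp [hlen]

theorem none_eq_some_nil_A (cperm : List Int) :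
    is_constant cperm none = is_constant cperm (some []) := rfl

theorem none_eq_some_nil_B (cperm : List Int) :
    is_constant_alt cperm none = is_constant_alt cperm (some []) := rfl

-- ===== VERDICT (by name: the statement is the Claim_ definition above) =====
theorem is_constant_spec : Claim_equal_is_constant := by
  intro cperm vals_seen _
  unfold Spec_is_constant
  cases vals_seen with
  | none => rw [none_eq_some_nil_A, none_eq_some_nil_B, A_eq_good, B_eq_good]
  | some vals => rw [A_eq_good, B_eq_good]
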